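-- pv_equiv track=rewrite | github.com/chiseungii/Algorithm_Study | 프로그래머스/Summer,Winter Coding(~2018)/지형 편집/지형 편집.py | solution
-- ===== SOURCE A (Python) =====
-- def solution(land, P, Q):
--     min_land,max_land = land[0][0],land[0][0]
--     for landi in land:
--         for l in landi:
--             max_land = max(max_land, l)
--             min_land = min(min_land, l)
--
--     answer = 100000000001
--     while min_land <= max_land:
--         mid = (min_land+max_land)//2
--
--         plus,minus = 0,0
--         plus_2,minus_2 = 0,0
--         for li in land:
--             for l in li:
--                 if l > mid: minus += (l-mid)
--                 else: plus += (mid-l)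
--
--                 if l > mid+1: minus_2 += (l-mid-1)
--                 else: plus_2 += (mid+1-l)
--
--         cost = plus*P + minus*Q
--         cost_2 = plus_2*P + minus_2*Q
--
--         if cost_2 < cost:
--             if cost_2 < answer: answer = cost_2
--             min_land = mid+2
--         else:
--             if cost < answer: answer = cost
--             max_land = mid-1
--
--     return answer
-- ===== SOURCE B (Python) =====
-- def solution(land, P, Q):
--     flat = sorted(l for row in land for l in row)
--     M = len(flat)
--     total = sum(flat)
--     best = 100000000001
--     j = 0
--     pre = 0
--     prev = None
--     for v in flat:
--         if prev is not None and v != prev: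
--             cost = P * (prev * j - pre) + Q * ((total - pre) - prev * (M - j))
--             if cost < best:
--                 best = cost
--         j += 1
--         pre += v
--         prev = v
--     if prev is not None:
--         cost = P * (prev * j - pre) + Q * ((total - pre) - prev * (M - j))
--         if cost < best:
--             best = cost
--     return best
-- ===== Notes on version B (the rewrite author's own statement) =====
-- stated objective: faster
-- what changed: Replaces the binary search over candidate heights (each step re-scanning the whole grid to price two heights) with one sort of the flattened heights plus running prefix sums, pricing every distinct height in a single linear pass.
-- outside the precondition, e.g. on solution([[5]], -2, -7): A returns -2, B returns 0; on solution([[], [3]], 1, 1): A raises IndexError, B returns 0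
import Mathlib
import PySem

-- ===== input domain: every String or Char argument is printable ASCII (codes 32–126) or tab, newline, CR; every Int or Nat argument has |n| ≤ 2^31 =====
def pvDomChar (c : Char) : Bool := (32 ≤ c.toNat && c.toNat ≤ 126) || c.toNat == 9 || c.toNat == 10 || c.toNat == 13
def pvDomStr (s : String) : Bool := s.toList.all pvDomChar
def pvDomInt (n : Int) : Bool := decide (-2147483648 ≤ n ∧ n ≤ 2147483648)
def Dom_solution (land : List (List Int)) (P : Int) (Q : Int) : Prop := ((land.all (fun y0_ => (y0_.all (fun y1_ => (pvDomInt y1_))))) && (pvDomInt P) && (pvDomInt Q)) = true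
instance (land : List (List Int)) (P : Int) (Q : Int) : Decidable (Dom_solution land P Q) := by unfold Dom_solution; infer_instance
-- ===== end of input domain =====

-- B replaces A's binary search over heights (full grid re-scan per step) by sort + prefix sums,
-- pricing each distinct height once in a single pass (objective: faster).

-- ===== PORT A =====

-- inner double loop accumulating (plus, minus, plus_2, minus_2)
def pvQuadStep (mid : Int) (s : Int × Int × Int × Int) (l : Int) : Int × Int × Int × Int :=
  match s with
  | (plus, minus, plus2, minus2) =>
    let s1 : Int × Int := if mid < l then (plus, minus + (l - mid)) else (plus + (mid - l), minus)
    let s2 : Int × Int := if mid + 1 < l then (plus2, minus2 + (l - mid - 1)) else (plus2 + (mid + 1 - l), minus2)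
    (s1.1, s1.2, s2.1, s2.2)

def pvCostQuad (land : List (List Int)) (mid : Int) : Int × Int × Int × Int :=
  land.foldl (fun s li => li.foldl (pvQuadStep mid) s) (0, 0, 0, 0)

-- termination helper for the while loop (cited by decreasing_by)
theorem pvMid_bounds (lo hi : Int) (h : lo ≤ hi) :
    lo ≤ PySem.Int.floordiv (lo + hi) 2 ∧ PySem.Int.floordiv (lo + hi) 2 ≤ hi := by
  rw [PySem.Int.floordiv_eq_ediv_of_pos (by norm_num : (0:Int) < 2)]
  omega

-- the while loop of A
def pvLoopA (land : List (List Int)) (P Q lo hi ans : Int) : Int :=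
  if h : lo ≤ hi then
    let mid := PySem.Int.floordiv (lo + hi) 2
    let q := pvCostQuad land mid
    let cost := q.1 * P + q.2.1 * Q
    let cost2 := q.2.2.1 * P + q.2.2.2 * Q
    if cost2 < cost then
      pvLoopA land P Q (mid + 2) hi (if cost2 < ans then cost2 else ans)
    else
      pvLoopA land P Q lo (mid - 1) (if cost < ans then cost else ans)
  else ans
termination_by (hi + 1 - lo).toNat
decreasing_by
  · have := pvMid_bounds lo hi h; omega
  · have := pvMid_bounds lo hi h; omega

def solution (land : List (List Int)) (P : Int) (Q : Int) : Int :=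
  match land with
  | [] => 0            -- land[0][0] raises in Python: excluded by Pre_, value arbitrary
  | [] :: _ => 0       -- likewise
  | (x :: _) :: _ =>
    let mm := land.foldl
      (fun (p : Int × Int) li => li.foldl (fun (p : Int × Int) l => (min p.1 l, max p.2 l)) p) (x, x)
    pvLoopA land P Q mm.1 mm.2 100000000001

-- ===== PORT B =====

-- one step of B's single pass over the sorted heights
def pvAltStep (P Q total M : Int) (s : Int × Int × Int × Option Int) (v : Int) : Int × Int × Int × Option Int :=
  match s with
  | (best, j, pre, prev) =>
    let best :=
      match prev with
      | some p =>
        if v ≠ p then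
          let cost := P * (p * j - pre) + Q * ((total - pre) - p * (M - j))
          if cost < best then cost else best
        else best
      | none => best
    (best, j + 1, pre + v, some v)

def solution_alt (land : List (List Int)) (P : Int) (Q : Int) : Int :=
  let flat := PySem.List.sorted (land.flatMap (fun r => r)) (fun x => x) false
  let M : Int := flat.length
  let total := flat.sum
  let s := flat.foldl (pvAltStep P Q total M) (100000000001, 0, 0, none)
  match s.2.2.2 with
  | none => s.1
  | some p =>
    let cost := P * (p * s.2.1 - s.2.2.1) + Q * ((total - s.2.2.1) - p * (M - s.2.1))
    if cost < s.1 then cost else s.1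

-- ===== PRECONDITION & SPEC =====
-- Pre_ excludes (a) empty land / empty first row, where A raises IndexError on land[0][0], and
-- (b) negative P or Q, outside the cost-minimisation domain, where A's binary search prices
-- heights outside the terrain range and its result is an artefact of the search path.
def Pre_solution (land : List (List Int)) (P : Int) (Q : Int) : Prop :=
  land ≠ [] ∧ land.headI ≠ [] ∧ 0 ≤ P ∧ 0 ≤ Q
instance (land : List (List Int)) (P : Int) (Q : Int) : Decidable (Pre_solution land P Q) := by
  unfold Pre_solution; infer_instance

def pvWitness_solution : List (List Int) × Int × Int := ([[1, 3], [2, 4]], 2, 3)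

def Spec_solution (land : List (List Int)) (P : Int) (Q : Int) (out : Int) : Prop := out = solution_alt land P Q
instance (land : List (List Int)) (P : Int) (Q : Int) (out : Int) : Decidable (Spec_solution land P Q out) := by unfold Spec_solution; infer_instance

-- ===== CLAIM (what is proved, stated in full; the proofs are below) =====
def Claim_equal_solution : Prop := ∀ (land : List (List Int)) (P : Int) (Q : Int), Dom_solution land P Q → Pre_solution land P Q → Spec_solution land P Q (solution land P Q)

-- ===== LEMMAS AND PROOFS =====

-- cost of levelling the heights xs to height h (per element: raise with P, lower with Q)
def pvCelt (P Q h l : Int) : Int := if h < l then Q * (l - h) else P * (h - l)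
def pvCostF (xs : List Int) (P Q h : Int) : Int := (xs.map (pvCelt P Q h)).sum
def pvCntLe (xs : List Int) (h : Int) : Int := (xs.countP (fun l => decide (l ≤ h)) : Int)
def pvCntGt (xs : List Int) (h : Int) : Int := (xs.countP (fun l => decide (h < l)) : Int)
def pvDelta (xs : List Int) (P Q h : Int) : Int := P * pvCntLe xs h - Q * pvCntGt xs h

-- min-fold over the priced heights of an integer interval, A's running answer
def pvRmin (xs : List Int) (P Q lo hi ans : Int) : Int :=
  ((PySem.List.pyRange lo (hi + 1) 1).map (fun h => pvCostF xs P Q h)).foldl min ans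

-- the distinct values of p :: r (r sorted, p ≤ r): B prices exactly these
def pvDv (p : Int) (r : List Int) : List Int :=
  match r with
  | [] => [p]
  | v :: r' => if v = p then pvDv p r' else p :: pvDv v r'

theorem pvCelt_succ (P Q h l : Int) :
    pvCelt P Q (h + 1) l = pvCelt P Q h l + (if l ≤ h then P else -Q) := by
  unfold pvCelt
  by_cases h1 : l ≤ h
  · rw [if_neg (by omega), if_neg (by omega), if_pos h1]; ring
  · by_cases h2 : h + 1 < l
    · rw [if_pos h2, if_pos (by omega), if_neg h1]; ring
    · have hl : l = h + 1 := by omega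
      subst hl; rw [if_neg (by omega), if_pos (by omega), if_neg h1]; ring

theorem pvCostF_succ (xs : List Int) (P Q h : Int) :
    pvCostF xs P Q (h + 1) = pvCostF xs P Q h + pvDelta xs P Q h := by
  induction xs with
  | nil => simp [pvCostF, pvDelta, pvCntLe, pvCntGt]
  | cons a t ih =>
    have hd : pvDelta (a :: t) P Q h = (if a ≤ h then P else -Q) + pvDelta t P Q h := by
      by_cases hah : a ≤ h
      · simp [pvDelta, pvCntLe, pvCntGt, hah, not_lt.mpr hah]; ring
      · simp [pvDelta, pvCntLe, pvCntGt, hah, not_le.mp hah]; ring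
    simp only [pvCostF, List.map_cons, List.sum_cons] at *
    rw [pvCelt_succ, hd, ih]; ring

theorem pvDelta_mono (xs : List Int) (P Q : Int) (hP : 0 ≤ P) (hQ : 0 ≤ Q) {h1 h2 : Int}
    (h : h1 ≤ h2) : pvDelta xs P Q h1 ≤ pvDelta xs P Q h2 := by
  have hc : pvCntLe xs h1 ≤ pvCntLe xs h2 := by
    unfold pvCntLe
    exact_mod_cast List.countP_mono_left (fun x _ hx => by simp at hx ⊢; omega)
  have hg : pvCntGt xs h2 ≤ pvCntGt xs h1 := by
    unfold pvCntGt
    exact_mod_cast List.countP_mono_left (fun x _ hx => by simp at hx ⊢; omega)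
  unfold pvDelta
  have t1 := mul_le_mul_of_nonneg_left hc hP
  have t2 := mul_le_mul_of_nonneg_left hg hQ
  linarith

theorem pvDelta_top (xs : List Int) (P Q H : Int) (hmax : ∀ l ∈ xs, l ≤ H) :
    pvDelta xs P Q H = P * xs.length := by
  unfold pvDelta pvCntLe pvCntGt
  rw [List.countP_eq_length.mpr (fun x hx => by simp [hmax x hx]),
      List.countP_eq_zero.mpr (fun x hx => by simp; exact hmax x hx)]
  push_cast; ring

-- generic min-fold facts
theorem pvLe_foldl_min {t : List Int} {a c : Int} (h1 : c ≤ a) (h2 : ∀ y ∈ t, c ≤ y) :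
    c ≤ t.foldl min a := by
  induction t generalizing a with
  | nil => exact h1
  | cons x t ih => exact ih (by have := h2 x (by simp); omega) (fun y hy => h2 y (by simp [hy]))

theorem pvFoldl_min_min (t : List Int) (a c : Int) :
    t.foldl min (min a c) = min (t.foldl min a) c := by
  induction t generalizing a with
  | nil => rfl
  | cons x t ih =>
    have hre : min (min a c) x = min (min a x) c := by omega
    simp only [List.foldl_cons, hre, ih]

theorem pvFoldl_min_eq {t : List Int} {c : Int} (a : Int) (h1 : ∀ y ∈ t, c ≤ y) (h2 : c ∈ t) :
    t.foldl min a = min a c := by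
  have hle : t.foldl min a ≤ min a c :=
    le_min (PySem.List.foldl_min_le t a).1 ((PySem.List.foldl_min_le t a).2 c h2)
  have hge : min a c ≤ t.foldl min a :=
    pvLe_foldl_min (min_le_left _ _) (fun y hy => le_trans (min_le_right a c) (h1 y hy))
  omega

-- decreasing / increasing chains of the cost function
theorem pvChain_down (xs : List Int) (P Q : Int) (hP : 0 ≤ P) (hQ : 0 ≤ Q) (mid : Int)
    (hneg : pvDelta xs P Q mid < 0) : ∀ h : Int, h ≤ mid + 1 → pvCostF xs P Q (mid + 1) ≤ pvCostF xs P Q h := by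
  suffices key : ∀ (k : ℕ) (h : Int), h = mid + 1 - k → pvCostF xs P Q (mid + 1) ≤ pvCostF xs P Q h by
    intro h hh
    exact key (mid + 1 - h).toNat h (by omega)
  intro k
  induction k with
  | zero => intro h hh; simp [hh]
  | succ k ih =>
    intro h hh
    have h1 : pvCostF xs P Q (h + 1) = pvCostF xs P Q h + pvDelta xs P Q h := pvCostF_succ xs P Q h
    have h2 : pvDelta xs P Q h ≤ pvDelta xs P Q mid := pvDelta_mono xs P Q hP hQ (by omega)
    have h3 := ih (h + 1) (by omega)
    omega

theorem pvChain_up (xs : List Int) (P Q : Int) (hP : 0 ≤ P) (hQ : 0 ≤ Q) (mid : Int)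
    (hpos : 0 ≤ pvDelta xs P Q mid) : ∀ h : Int, mid ≤ h → pvCostF xs P Q mid ≤ pvCostF xs P Q h := by
  suffices key : ∀ (k : ℕ) (h : Int), h = mid + k → pvCostF xs P Q mid ≤ pvCostF xs P Q h by
    intro h hh
    exact key (h - mid).toNat h (by omega)
  intro k
  induction k with
  | zero => intro h hh; simp [hh]
  | succ k ih =>
    intro h hh
    have h1 : pvCostF xs P Q (mid + k + 1) = pvCostF xs P Q (mid + k) + pvDelta xs P Q (mid + k) :=
      pvCostF_succ xs P Q (mid + k)
    have h2 : pvDelta xs P Q mid ≤ pvDelta xs P Q (mid + k) := pvDelta_mono xs P Q hP hQ (by omega)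
    have h3 := ih (mid + k) rfl
    have hh' : h = mid + (k : Int) + 1 := by push_cast [hh]; ring
    rw [hh']; omega

theorem pvQuadFold (P Q mid : Int) (xs : List Int) : ∀ (a b c d : Int),
    ((xs.foldl (pvQuadStep mid) (a, b, c, d)).1 * P + (xs.foldl (pvQuadStep mid) (a, b, c, d)).2.1 * Q
        = a * P + b * Q + pvCostF xs P Q mid) ∧
    ((xs.foldl (pvQuadStep mid) (a, b, c, d)).2.2.1 * P + (xs.foldl (pvQuadStep mid) (a, b, c, d)).2.2.2 * Q
        = c * P + d * Q + pvCostF xs P Q (mid + 1)) := by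
  induction xs with
  | nil => intro a b c d; simp [pvCostF]
  | cons l t ih =>
    intro a b c d
    by_cases h1 : mid < l
    · by_cases h2 : mid + 1 < l
      · have hstep : pvQuadStep mid (a, b, c, d) l = (a, b + (l - mid), c, d + (l - mid - 1)) := by
          simp [pvQuadStep, h1, h2]
        simp only [List.foldl_cons, hstep]
        obtain ⟨i1, i2⟩ := ih a (b + (l - mid)) c (d + (l - mid - 1))
        constructor
        · rw [i1]; simp [pvCostF, pvCelt, h1]; ring
        · rw [i2]; simp [pvCostF, pvCelt, h2]; ring
      · have hstep : pvQuadStep mid (a, b, c, d) l = (a, b + (l - mid), c + (mid + 1 - l), d) := by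
          simp [pvQuadStep, h1, h2]
        simp only [List.foldl_cons, hstep]
        obtain ⟨i1, i2⟩ := ih a (b + (l - mid)) (c + (mid + 1 - l)) d
        constructor
        · rw [i1]; simp [pvCostF, pvCelt, h1]; ring
        · rw [i2]; simp [pvCostF, pvCelt, h2]; ring
    · have h2 : ¬ mid + 1 < l := by omega
      have hstep : pvQuadStep mid (a, b, c, d) l = (a + (mid - l), b, c + (mid + 1 - l), d) := by
        simp [pvQuadStep, h1, h2]
      simp only [List.foldl_cons, hstep]
      obtain ⟨i1, i2⟩ := ih (a + (mid - l)) b (c + (mid + 1 - l)) d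
      constructor
      · rw [i1]; simp [pvCostF, pvCelt, h1]; ring
      · rw [i2]; simp [pvCostF, pvCelt, h2]; ring

-- A's inner double loop prices mid and mid+1
theorem pvCostQuad_eq (land : List (List Int)) (P Q mid : Int) :
    (pvCostQuad land mid).1 * P + (pvCostQuad land mid).2.1 * Q
        = pvCostF (land.flatMap (fun r => r)) P Q mid ∧
    (pvCostQuad land mid).2.2.1 * P + (pvCostQuad land mid).2.2.2 * Q
        = pvCostF (land.flatMap (fun r => r)) P Q (mid + 1) := by
  have hflat : land.flatMap (fun r => r) = land.flatten := by simp
  have hfold : pvCostQuad land mid = (land.flatten).foldl (pvQuadStep mid) (0, 0, 0, 0) := by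
    unfold pvCostQuad; rw [List.foldl_flatten]
  rw [hflat, hfold]
  have := pvQuadFold P Q mid land.flatten 0 0 0 0
  simpa using this

theorem pvPairFold (xs : List Int) : ∀ (a b : Int),
    xs.foldl (fun (p : Int × Int) l => (min p.1 l, max p.2 l)) (a, b)
      = (xs.foldl min a, xs.foldl max b) := by
  induction xs with
  | nil => intro a b; rfl
  | cons y t ih => intro a b; simp only [List.foldl_cons]; exact ih (min a y) (max b y)

-- A's first loop computes the min and max of the flattened heights
theorem pvMinMax_eq (land : List (List Int)) (x : Int) :
    land.foldl (fun (p : Int × Int) li => li.foldl (fun (p : Int × Int) l => (min p.1 l, max p.2 l)) p) (x, x)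
      = ((land.flatMap (fun r => r)).foldl min x, (land.flatMap (fun r => r)).foldl max x) := by
  have hflat : land.flatMap (fun r => r) = land.flatten := by simp
  rw [hflat, ← List.foldl_flatten, pvPairFold]

-- the while loop computes the min of the already-recorded answer and the priced interval
theorem pvLoopA_eq (land : List (List Int)) (P Q : Int) (hP : 0 ≤ P) (hQ : 0 ≤ Q)
    (L H : Int) (hmem : ∀ l ∈ land.flatMap (fun r => r), L ≤ l ∧ l ≤ H) :
    ∀ (n : ℕ) (lo hi ans : Int), (hi + 1 - lo).toNat = n → L ≤ lo → hi ≤ H →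
      pvRmin (land.flatMap (fun r => r)) P Q lo hi ans
        = pvRmin (land.flatMap (fun r => r)) P Q L H 100000000001 →
      pvLoopA land P Q lo hi ans = pvRmin (land.flatMap (fun r => r)) P Q L H 100000000001 := by
  set F := land.flatMap (fun r => r) with hF
  set T := pvRmin F P Q L H 100000000001 with hT
  intro n
  induction n using Nat.strong_induction_on with
  | _ n ih =>
    intro lo hi ans hn hLlo hhiH hR
    rw [pvLoopA]
    by_cases hlh : lo ≤ hi
    · rw [dif_pos hlh]
      dsimp only
      have hmb := pvMid_bounds lo hi hlh
      set mid := PySem.Int.floordiv (lo + hi) 2 with hmid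
      have hmid2 : mid = (lo + hi) / 2 := by
        rw [hmid, PySem.Int.floordiv_eq_ediv_of_pos (by norm_num : (0:Int) < 2)]
      obtain ⟨hq1, hq2⟩ := pvCostQuad_eq land P Q mid
      rw [← hF] at hq1 hq2
      rw [hq1, hq2]
      have hdelta : pvCostF F P Q (mid + 1) = pvCostF F P Q mid + pvDelta F P Q mid :=
        pvCostF_succ F P Q mid
      by_cases hcc : pvCostF F P Q (mid + 1) < pvCostF F P Q mid
      · rw [if_pos hcc]
        have hans : (if pvCostF F P Q (mid + 1) < ans then pvCostF F P Q (mid + 1) else ans)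
            = min ans (pvCostF F P Q (mid + 1)) := by omega
        rw [hans]
        have hdneg : pvDelta F P Q mid < 0 := by omega
        by_cases hmh : mid < hi
        · have hkey : pvRmin F P Q lo hi ans
              = pvRmin F P Q (mid + 2) hi (min ans (pvCostF F P Q (mid + 1))) := by
            unfold pvRmin
            rw [PySem.List.pyRange_one_append lo (mid + 2) (hi + 1) (by omega) (by omega)]
            rw [List.map_append, List.foldl_append]
            congr 1
            apply pvFoldl_min_eq
            · intro y hy
              simp only [List.mem_map] at hy
              obtain ⟨h', hh', rfl⟩ := hy
              rw [PySem.List.mem_pyRange_one] at hh'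
              exact pvChain_down F P Q hP hQ mid hdneg h' (by omega)
            · simp only [List.mem_map]
              exact ⟨mid + 1, by rw [PySem.List.mem_pyRange_one]; omega, rfl⟩
          exact ih (hi + 1 - (mid + 2)).toNat (by omega) (mid + 2) hi _ rfl (by omega) hhiH
            (by rw [← hkey]; exact hR)
        · have hloeq : lo = hi := by omega
          have hmideq : mid = lo := by omega
          have hH2 : hi < H := by
            by_contra hcon
            have hhiH' : hi = H := by omega
            have htop := pvDelta_top F P Q H (fun l hl => (hmem l hl).2)
            have hnn : 0 ≤ pvDelta F P Q H := by
              rw [htop]; positivity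
            rw [← hhiH', ← hloeq, ← hmideq] at hnn
            omega
          have hsing : pvRmin F P Q lo hi ans = min ans (pvCostF F P Q lo) := by
            unfold pvRmin
            rw [hloeq, PySem.List.pyRange_one_singleton]
            simp
          have hTle : T ≤ pvCostF F P Q (mid + 1) := by
            have hm : pvCostF F P Q (mid + 1)
                ∈ (PySem.List.pyRange L (H + 1) 1).map (fun h => pvCostF F P Q h) := by
              simp only [List.mem_map]
              exact ⟨mid + 1, by rw [PySem.List.mem_pyRange_one]; omega, rfl⟩
            exact (PySem.List.foldl_min_le _ _).2 _ hm
          rw [pvLoopA, dif_neg (by omega : ¬ mid + 2 ≤ hi)]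
          have hR' : min ans (pvCostF F P Q lo) = T := by rw [← hsing]; exact hR
          rw [hmideq] at hcc hTle ⊢
          omega
      · rw [if_neg hcc]
        have hdpos : 0 ≤ pvDelta F P Q mid := by omega
        have hans : (if pvCostF F P Q mid < ans then pvCostF F P Q mid else ans)
            = min ans (pvCostF F P Q mid) := by omega
        rw [hans]
        have hkey : pvRmin F P Q lo hi ans
            = min (((PySem.List.pyRange lo mid 1).map (fun h => pvCostF F P Q h)).foldl min ans)
                (pvCostF F P Q mid) := by
          unfold pvRmin
          rw [PySem.List.pyRange_one_append lo mid (hi + 1) (by omega) (by omega)]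
          rw [List.map_append, List.foldl_append]
          apply pvFoldl_min_eq
          · intro y hy
            simp only [List.mem_map] at hy
            obtain ⟨h', hh', rfl⟩ := hy
            rw [PySem.List.mem_pyRange_one] at hh'
            exact pvChain_up F P Q hP hQ mid hdpos h' (by omega)
          · simp only [List.mem_map]
            exact ⟨mid, by rw [PySem.List.mem_pyRange_one]; omega, rfl⟩
        have hnew : pvRmin F P Q lo (mid - 1) (min ans (pvCostF F P Q mid)) = T := by
          unfold pvRmin
          have e : mid - 1 + 1 = mid := by ring
          rw [e, pvFoldl_min_min, ← hkey]
          exact hR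
        exact ih (mid - 1 + 1 - lo).toNat (by omega) lo (mid - 1) _ rfl hLlo (by omega) hnew
    · rw [dif_neg hlh]
      rw [← hR]
      unfold pvRmin
      rw [PySem.List.pyRange_one_eq_nil (by omega : hi + 1 ≤ lo)]
      simp

-- dv facts
theorem pvDv_subset (p : Int) (r : List Int) : ∀ x ∈ pvDv p r, x ∈ p :: r := by
  induction r generalizing p with
  | nil => intro x hx; simpa [pvDv] using hx
  | cons v r' ih =>
    intro x hx
    by_cases hv : v = p
    · subst hv
      rw [pvDv, if_pos rfl] at hx
      have := ih v x hx
      simp at this ⊢; tauto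
    · rw [pvDv, if_neg hv] at hx
      rcases List.mem_cons.mp hx with h | h
      · simp [h]
      · have := ih v x h
        simp at this ⊢; tauto

theorem pvMem_dv (p : Int) (r : List Int) : ∀ x ∈ p :: r, x ∈ pvDv p r := by
  induction r generalizing p with
  | nil => intro x hx; simpa [pvDv] using hx
  | cons v r' ih =>
    intro x hx
    by_cases hv : v = p
    · subst hv
      rw [pvDv, if_pos rfl]
      apply ih
      simp at hx ⊢; tauto
    · rw [pvDv, if_neg hv]
      rcases List.mem_cons.mp hx with h | h
      · simp [h]
      · exact List.mem_cons_of_mem _ (ih v x h)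

-- splitting the cost at a height p that separates the list
theorem pvCostF_all_le (xs : List Int) (P Q p : Int) (h : ∀ l ∈ xs, l ≤ p) :
    pvCostF xs P Q p = P * (p * xs.length - xs.sum) := by
  induction xs with
  | nil => simp [pvCostF]
  | cons a t ih =>
    have ha : a ≤ p := h a (by simp)
    rw [pvCostF, List.map_cons, List.sum_cons, ← pvCostF, ih (fun l hl => h l (by simp [hl]))]
    rw [pvCelt, if_neg (by omega)]
    simp only [List.length_cons, List.sum_cons]
    push_cast; ring

theorem pvCostF_all_gt (xs : List Int) (P Q p : Int) (h : ∀ l ∈ xs, p < l) :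
    pvCostF xs P Q p = Q * (xs.sum - p * xs.length) := by
  induction xs with
  | nil => simp [pvCostF]
  | cons a t ih =>
    have ha : p < a := h a (by simp)
    rw [pvCostF, List.map_cons, List.sum_cons, ← pvCostF, ih (fun l hl => h l (by simp [hl]))]
    rw [pvCelt, if_pos ha]
    simp only [List.length_cons, List.sum_cons]
    push_cast; ring

-- the final pricing step of B, on the fold's end state
def pvFinish (P Q total M : Int) (st : Int × Int × Int × Option Int) : Int :=
  match st.2.2.2 with
  | none => st.1
  | some p =>
    let cost := P * (p * st.2.1 - st.2.2.1) + Q * ((total - st.2.2.1) - p * (M - st.2.1))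
    if cost < st.1 then cost else st.1

theorem pvAlt_eq_finish (land : List (List Int)) (P Q : Int) :
    solution_alt land P Q
      = pvFinish P Q (PySem.List.sorted (land.flatMap (fun r => r)) (fun x => x) false).sum
          ((PySem.List.sorted (land.flatMap (fun r => r)) (fun x => x) false).length : Int)
          ((PySem.List.sorted (land.flatMap (fun r => r)) (fun x => x) false).foldl
            (pvAltStep P Q (PySem.List.sorted (land.flatMap (fun r => r)) (fun x => x) false).sum
              ((PySem.List.sorted (land.flatMap (fun r => r)) (fun x => x) false).length : Int))
            (100000000001, 0, 0, none)) := by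
  rfl

-- B's fold prices exactly the distinct heights
theorem pvAltFold (P Q : Int) (s : List Int) (hs : s.Pairwise (· ≤ ·)) :
    ∀ (r u : List Int) (p best : Int), s = u ++ r → (∀ x ∈ u, x ≤ p) → p ∈ u →
      pvFinish P Q s.sum (s.length : Int)
          (r.foldl (pvAltStep P Q s.sum (s.length : Int)) (best, (u.length : Int), u.sum, some p))
        = ((pvDv p r).map (fun v => pvCostF s P Q v)).foldl min best := by
  intro r
  induction r with
  | nil =>
    intro u p best hsu hup hpu
    have hsu' : s = u := by simpa using hsu
    subst hsu'
    have hc : P * (p * ((s.length : Int)) - s.sum) + Q * ((s.sum - s.sum) - p * ((s.length : Int) - (s.length : Int)))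
        = pvCostF s P Q p := by
      rw [pvCostF_all_le s P Q p hup]; ring
    simp only [List.foldl_nil, pvFinish, pvDv, List.map_cons, List.map_nil, List.foldl_cons]
    rw [hc]
    omega
  | cons v r' ih =>
    intro u p best hsu hup hpu
    have hpw := hs
    rw [hsu, List.pairwise_append] at hpw
    obtain ⟨hpu', hpr, hcross⟩ := hpw
    have hpv : p ≤ v := hcross p hpu v (by simp)
    by_cases hv : v = p
    · subst hv
      have hstep : pvAltStep P Q s.sum (s.length : Int) (best, (u.length : Int), u.sum, some v) v
          = (best, (u.length : Int) + 1, u.sum + v, some v) := by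
        simp [pvAltStep]
      rw [List.foldl_cons, hstep]
      have e1 : ((u ++ [v]).length : Int) = (u.length : Int) + 1 := by simp
      have e2 : (u ++ [v]).sum = u.sum + v := by simp
      have hup' : ∀ x ∈ u ++ [v], x ≤ v := by
        intro x hx
        simp at hx
        rcases hx with h | h
        · exact hup x h
        · omega
      have := ih (u ++ [v]) v best (by simpa using hsu) hup' (by simp)
      rw [e1, e2] at this
      rw [this, pvDv, if_pos rfl]
    · have hlt : p < v := by omega
      have hgtall : ∀ x ∈ v :: r', p < x := by
        intro x hx
        rcases List.mem_cons.mp hx with h | h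
        · omega
        · have := (List.pairwise_cons.mp hpr).1 x h; omega
      have hcost : P * (p * ((u.length : Int)) - u.sum) + Q * ((s.sum - u.sum) - p * ((s.length : Int) - (u.length : Int)))
          = pvCostF s P Q p := by
        have hsplit : pvCostF s P Q p = pvCostF u P Q p + pvCostF (v :: r') P Q p := by
          rw [hsu]; simp [pvCostF]
        rw [hsplit, pvCostF_all_le u P Q p hup, pvCostF_all_gt (v :: r') P Q p hgtall]
        have e3 : s.sum = u.sum + (v :: r').sum := by rw [hsu]; simp
        have e4 : (s.length : Int) = (u.length : Int) + ((v :: r').length : Int) := by rw [hsu]; push_cast [List.length_append]; ring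
        rw [e3, e4]
        ring
      have hmin : (if pvCostF s P Q p < best then pvCostF s P Q p else best)
          = min best (pvCostF s P Q p) := by omega
      have hstep : pvAltStep P Q s.sum (s.length : Int) (best, (u.length : Int), u.sum, some p) v
          = (min best (pvCostF s P Q p), (u.length : Int) + 1, u.sum + v, some v) := by
        simp only [pvAltStep]
        rw [if_pos (show v ≠ p from hv), hcost, hmin]
      rw [List.foldl_cons, hstep]
      have e1 : ((u ++ [v]).length : Int) = (u.length : Int) + 1 := by simp
      have e2 : (u ++ [v]).sum = u.sum + v := by simp
      have hup' : ∀ x ∈ u ++ [v], x ≤ v := by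
        intro x hx
        simp at hx
        rcases hx with h | h
        · have := hcross x h v (by simp); omega
        · omega
      have := ih (u ++ [v]) v (min best (pvCostF s P Q p)) (by simpa using hsu) hup' (by simp)
      rw [e1, e2] at this
      rw [this, pvDv, if_neg hv, List.map_cons, List.foldl_cons]

-- a height absent from the terrain has the same marginal cost as its predecessor
theorem pvDelta_not_mem (xs : List Int) (P Q h : Int) (hnm : h ∉ xs) :
    pvDelta xs P Q h = pvDelta xs P Q (h - 1) := by
  unfold pvDelta pvCntLe pvCntGt
  have e1 : xs.countP (fun l => decide (l ≤ h)) = xs.countP (fun l => decide (l ≤ h - 1)) := by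
    apply List.countP_congr
    intro x hx
    have : x ≠ h := fun he => hnm (he ▸ hx)
    simp; omega
  have e2 : xs.countP (fun l => decide (h < l)) = xs.countP (fun l => decide (h - 1 < l)) := by
    apply List.countP_congr
    intro x hx
    have : x ≠ h := fun he => hnm (he ▸ hx)
    simp; omega
  rw [e1, e2]

-- walking right from a height with falling cost reaches a terrain height at most as expensive
theorem pvWalkRight (s : List Int) (P Q H : Int) (hH : H ∈ s) :
    ∀ (k : ℕ) (h : Int), (H - h).toNat = k → h ≤ H → pvDelta s P Q (h - 1) < 0 →
      ∃ v ∈ s, pvCostF s P Q v ≤ pvCostF s P Q h := by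
  intro k
  induction k with
  | zero =>
    intro h hk hh _
    have : h = H := by omega
    exact ⟨h, this ▸ hH, le_refl _⟩
  | succ k ih =>
    intro h hk hh hd
    by_cases hms : h ∈ s
    · exact ⟨h, hms, le_refl _⟩
    · have hhH : h < H := by
        rcases lt_or_eq_of_le hh with h' | h'
        · exact h'
        · exact absurd (h' ▸ hH) hms
      have hdh : pvDelta s P Q h < 0 := by rw [pvDelta_not_mem s P Q h hms]; exact hd
      have hsucc : pvCostF s P Q (h + 1) = pvCostF s P Q h + pvDelta s P Q h := pvCostF_succ s P Q h
      have hd' : pvDelta s P Q (h + 1 - 1) < 0 := by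
        have e : h + 1 - 1 = h := by ring
        rw [e]; exact hdh
      obtain ⟨v, hv, hvc⟩ := ih (h + 1) (by omega) (by omega) hd'
      exact ⟨v, hv, by omega⟩

-- a height in the terrain range is never cheaper than every terrain height
theorem pvWalk (s : List Int) (P Q L H : Int)
    (hL : L ∈ s) (hH : H ∈ s) :
    ∀ h : Int, L ≤ h → h ≤ H → ∃ v ∈ s, pvCostF s P Q v ≤ pvCostF s P Q h := by
  suffices key : ∀ (k : ℕ) (h : Int), (h - L).toNat = k → L ≤ h → h ≤ H →
      ∃ v ∈ s, pvCostF s P Q v ≤ pvCostF s P Q h by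
    intro h h1 h2
    exact key (h - L).toNat h rfl h1 h2
  intro k
  induction k with
  | zero =>
    intro h hk h1 h2
    have : h = L := by omega
    exact ⟨h, this ▸ hL, le_refl _⟩
  | succ k ih =>
    intro h hk h1 h2
    by_cases hms : h ∈ s
    · exact ⟨h, hms, le_refl _⟩
    · have hLh : L < h := by
        rcases lt_or_eq_of_le h1 with h' | h'
        · exact h'
        · exact absurd (h' ▸ hL) hms
      by_cases hd : pvDelta s P Q (h - 1) < 0
      · exact pvWalkRight s P Q H hH (H - h).toNat h rfl h2 hd
      · have hsucc : pvCostF s P Q (h - 1 + 1) = pvCostF s P Q (h - 1) + pvDelta s P Q (h - 1) :=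
          pvCostF_succ s P Q (h - 1)
        have e : h - 1 + 1 = h := by ring
        rw [e] at hsucc
        obtain ⟨v, hv, hvc⟩ := ih (h - 1) (by omega) (by omega) (by omega)
        exact ⟨v, hv, by omega⟩

-- main equivalence on a destructured input
theorem pvMain (x : Int) (t0 : List Int) (t : List (List Int)) (P Q : Int)
    (hP : 0 ≤ P) (hQ : 0 ≤ Q) :
    solution ((x :: t0) :: t) P Q = solution_alt ((x :: t0) :: t) P Q := by
  set F := ((x :: t0) :: t).flatMap (fun r => r) with hF
  have hxF : x ∈ F := by simp [hF]
  set L := F.foldl min x with hL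
  set H := F.foldl max x with hH
  have hmem : ∀ l ∈ F, L ≤ l ∧ l ≤ H := fun l hl =>
    ⟨(PySem.List.foldl_min_le F x).2 l hl, (PySem.List.le_foldl_max F x).2 l hl⟩
  have hLF : L ∈ F := by
    rcases PySem.List.foldl_min_mem F x with h | h
    · rw [hL, h]; exact hxF
    · rw [hL]; exact h
  have hHF : H ∈ F := by
    rcases PySem.List.foldl_max_mem F x with h | h
    · rw [hH, h]; exact hxF
    · rw [hH]; exact h
  -- A side
  have hA : solution ((x :: t0) :: t) P Q = pvLoopA ((x :: t0) :: t) P Q L H 100000000001 := by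
    unfold solution
    dsimp only
    rw [pvMinMax_eq]
  have hAT : pvLoopA ((x :: t0) :: t) P Q L H 100000000001 = pvRmin F P Q L H 100000000001 :=
    pvLoopA_eq _ P Q hP hQ L H hmem (H + 1 - L).toNat L H _ rfl (le_refl L) (le_refl H) rfl
  -- B side
  set s := PySem.List.sorted F (fun x => x) false with hs
  have hperm : s.Perm F := PySem.List.sorted_perm F _ _
  have hsne : s ≠ [] := by
    rw [hs, Ne, PySem.List.sorted_eq_nil_iff]
    simp [hF]
  obtain ⟨v0, rest, hsl⟩ := List.exists_cons_of_ne_nil hsne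
  have hcost : ∀ h : Int, pvCostF s P Q h = pvCostF F P Q h := fun h =>
    List.Perm.sum_eq (hperm.map _)
  have hpw : s.Pairwise (· ≤ ·) := by
    rw [hs]; exact PySem.List.sorted_pairwise F (fun x => x)
  have hBfold := pvAltFold P Q s hpw rest [v0] v0 100000000001
    (by rw [hsl]; rfl) (by simp) (by simp)
  simp only [List.length_cons, List.length_nil, List.sum_cons, List.sum_nil, add_zero] at hBfold
  have hB : solution_alt ((x :: t0) :: t) P Q
      = ((pvDv v0 rest).map (fun v => pvCostF s P Q v)).foldl min 100000000001 := by
    rw [pvAlt_eq_finish, ← hF, ← hs, hsl, List.foldl_cons]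
    have hstep0 : pvAltStep P Q s.sum (s.length : Int) (100000000001, 0, 0, none) v0
        = (100000000001, 1, v0, some v0) := by simp [pvAltStep]
    rw [← hsl, hstep0]
    exact hBfold
  -- the two minima agree
  set T := pvRmin F P Q L H 100000000001 with hT
  set Bv := ((pvDv v0 rest).map (fun v => pvCostF s P Q v)).foldl min 100000000001 with hBv
  have hdvs : ∀ v ∈ pvDv v0 rest, v ∈ s := by
    intro v hv
    rw [hsl]
    exact pvDv_subset v0 rest v hv
  have hTleB : T ≤ Bv := by
    apply pvLe_foldl_min
    · exact (PySem.List.foldl_min_le _ _).1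
    · intro y hy
      simp only [List.mem_map] at hy
      obtain ⟨v, hv, rfl⟩ := hy
      have hvF : v ∈ F := hperm.mem_iff.mp (hdvs v hv)
      have hbd := hmem v hvF
      have hmemT : pvCostF F P Q v
          ∈ (PySem.List.pyRange L (H + 1) 1).map (fun h => pvCostF F P Q h) := by
        simp only [List.mem_map]
        exact ⟨v, by rw [PySem.List.mem_pyRange_one]; omega, rfl⟩
      rw [hcost v]
      exact (PySem.List.foldl_min_le _ _).2 _ hmemT
  have hBleT : Bv ≤ T := by
    apply pvLe_foldl_min
    · exact (PySem.List.foldl_min_le _ _).1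
    · intro y hy
      simp only [List.mem_map] at hy
      obtain ⟨h, hh, rfl⟩ := hy
      rw [PySem.List.mem_pyRange_one] at hh
      have hLs : L ∈ s := hperm.mem_iff.mpr hLF
      have hHs : H ∈ s := hperm.mem_iff.mpr hHF
      obtain ⟨v, hvs, hvc⟩ := pvWalk s P Q L H hLs hHs h hh.1 (by omega)
      have hvd : v ∈ pvDv v0 rest := pvMem_dv v0 rest v (hsl ▸ hvs)
      have hmemB : pvCostF s P Q v ∈ (pvDv v0 rest).map (fun v => pvCostF s P Q v) := by
        simp only [List.mem_map]
        exact ⟨v, hvd, rfl⟩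
      have := (PySem.List.foldl_min_le ((pvDv v0 rest).map (fun v => pvCostF s P Q v)) 100000000001).2 _ hmemB
      rw [← hcost h]
      omega
  rw [hA, hAT, hB]
  omega

-- ===== VERDICT (by name: the statement is the Claim_ definition above) =====
theorem solution_spec : Claim_equal_solution := by
  unfold Claim_equal_solution
  intro land P Q hdom hpre
  obtain ⟨hne, hhead, hP, hQ⟩ := hpre
  unfold Spec_solution
  rcases land with _ | ⟨r0, t⟩
  · exact absurd rfl hne
  rcases r0 with _ | ⟨x, t0⟩
  · simp at hhead
  exact pvMain x t0 t P Q hP hQ
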